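-- pv_equiv track=rewrite | github.com/2149-SRUTHI-S/Turing-Machine-Simulator | Turing_Machine Simulator/main.py | accepts_odd_ones_odd_zeros
-- ===== SOURCE A (Python) =====
-- def accepts_odd_ones_odd_zeros(string):
-- 	state = 0
-- 	for symbol in string:
-- 		if state == 0:
-- 			if symbol == '0':
-- 				state = 2
-- 			elif symbol == '1':
-- 				state = 1
-- 			else:
-- 				return False
-- 		elif state == 1:
-- 			if symbol == '0':
-- 				state = 3
-- 			elif symbol == '1':
-- 				state = 0
-- 			else:
-- 				return False
-- 		elif state == 2:
-- 			if symbol == '0':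
-- 				state = 0
-- 			elif symbol == '1':
-- 				state = 3
-- 			else:
-- 				return False
-- 		elif state == 3:
-- 			if symbol == '0':
-- 				state = 1
-- 			elif symbol == '1':
-- 				state = 2
-- 			else:
-- 				return False
-- 	return state == 3
-- ===== SOURCE B (Python) =====
-- def accepts_odd_ones_odd_zeros(string):
--     if not all(c == '0' or c == '1' for c in string):
--         return False
--     zeros = sum(c == '0' for c in string)
--     ones = len(string) - zeros
--     return zeros % 2 == 1 and ones % 2 == 1
-- ===== Notes on version B (the rewrite author's own statement) =====
-- stated objective: simpler
-- what changed: Replaces the 4-state DFA transition table with a validity check plus parity of the symbol counts (count of '0' odd and count of '1' odd).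
import Mathlib
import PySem

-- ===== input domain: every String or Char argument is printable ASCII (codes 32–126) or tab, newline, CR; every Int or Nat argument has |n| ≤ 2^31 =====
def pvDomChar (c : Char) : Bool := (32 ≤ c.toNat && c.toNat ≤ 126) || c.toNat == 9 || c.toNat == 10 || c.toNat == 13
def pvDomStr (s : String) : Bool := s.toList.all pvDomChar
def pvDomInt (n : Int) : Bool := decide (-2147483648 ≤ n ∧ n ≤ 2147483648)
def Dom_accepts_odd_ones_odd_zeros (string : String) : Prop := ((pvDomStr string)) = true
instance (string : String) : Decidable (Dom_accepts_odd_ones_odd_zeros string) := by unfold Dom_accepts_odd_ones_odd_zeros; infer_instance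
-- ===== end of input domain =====

-- B replaces A's 4-state DFA transition table with a validity check plus symbol-count parity (simpler decomposition, same O(n) cost).


-- ===== PORT A =====
-- the 'for symbol in string' loop with early 'return False' and running state
def pvGoA : Int → List Char → Bool
  | st, [] => st == 3
  | st, c :: cs =>
    if st == 0 then
      if c == '0' then pvGoA 2 cs else if c == '1' then pvGoA 1 cs else false
    else if st == 1 then
      if c == '0' then pvGoA 3 cs else if c == '1' then pvGoA 0 cs else false
    else if st == 2 then
      if c == '0' then pvGoA 0 cs else if c == '1' then pvGoA 3 cs else false
    else if st == 3 then
      if c == '0' then pvGoA 1 cs else if c == '1' then pvGoA 2 cs else false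
    else pvGoA st cs  -- no branch fires: the Python loop body falls through, state unchanged

def accepts_odd_ones_odd_zeros (string : String) : Bool := pvGoA 0 string.toList

-- ===== PORT B =====
def accepts_odd_ones_odd_zeros_alt (string : String) : Bool :=
  let cs := string.toList
  if !(cs.all fun c => c == '0' || c == '1') then false
  else
    let zeros := cs.countP (fun c => c == '0')   -- sum(c == '0' for c in string)
    let ones := cs.length - zeros
    zeros % 2 == 1 && ones % 2 == 1

-- ===== PRECONDITION & SPEC =====
def Spec_accepts_odd_ones_odd_zeros (string : String) (out : Bool) : Prop := out = accepts_odd_ones_odd_zeros_alt string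
instance (string : String) (out : Bool) : Decidable (Spec_accepts_odd_ones_odd_zeros string out) := by unfold Spec_accepts_odd_ones_odd_zeros; infer_instance

-- ===== CLAIM (what is proved, stated in full; the proofs are below) =====
def Claim_equal_accepts_odd_ones_odd_zeros : Prop := ∀ (string : String), Dom_accepts_odd_ones_odd_zeros string → Spec_accepts_odd_ones_odd_zeros string (accepts_odd_ones_odd_zeros string)

-- ===== LEMMAS AND PROOFS =====
-- characterisation of A's loop: state encodes (parity of '0's, parity of '1's) seen so far
def pvChar (cs : List Char) (z o : Nat) : Bool :=
  (cs.all fun c => c == '0' || c == '1')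
    && ((cs.countP (fun c => c == '0') + z) % 2 == 1)
    && ((cs.countP (fun c => c == '1') + o) % 2 == 1)

lemma pvGoA_char (cs : List Char) :
    pvGoA 0 cs = pvChar cs 0 0 ∧ pvGoA 1 cs = pvChar cs 0 1 ∧
    pvGoA 2 cs = pvChar cs 1 0 ∧ pvGoA 3 cs = pvChar cs 1 1 := by
  induction cs with
  | nil => simp [pvGoA, pvChar]
  | cons c cs ih =>
    obtain ⟨ih0, ih1, ih2, ih3⟩ := ih
    by_cases h0 : c = '0'
    · simp [pvGoA, pvChar, h0, ih0, ih1, ih2, ih3, Nat.add_assoc]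
    · by_cases h1 : c = '1'
      · simp [pvGoA, pvChar, h1, ih0, ih1, ih2, ih3, Nat.add_assoc]
      · simp [pvGoA, pvChar, h0, h1]

lemma pv_count01 (cs : List Char) (h : cs.all (fun c => c == '0' || c == '1') = true) :
    cs.countP (fun c => c == '1') = cs.length - cs.countP (fun c => c == '0') := by
  have hsum : cs.length = cs.countP (fun c => c == '0') + cs.countP (fun c => c == '1') := by
    rw [List.length_eq_countP_add_countP (fun c => c == '0') (l := cs)]
    congr 1
    refine List.countP_congr (fun c hc => ?_)
    have := List.all_eq_true.mp h c hc
    rcases Bool.or_eq_true_iff.mp this with h' | h'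
    · simp [eq_of_beq h']
    · have : c = '1' := eq_of_beq h'
      subst this; simp
  omega

-- ===== VERDICT (by name: the statement is the Claim_ definition above) =====
theorem accepts_odd_ones_odd_zeros_spec : Claim_equal_accepts_odd_ones_odd_zeros := by
  intro s _
  unfold Spec_accepts_odd_ones_odd_zeros accepts_odd_ones_odd_zeros accepts_odd_ones_odd_zeros_alt
  have h := (pvGoA_char s.toList).1
  rw [h]
  by_cases hall : s.toList.all (fun c => c == '0' || c == '1') = true
  · simp [pvChar, hall, pv_count01 s.toList hall]
  · simp [pvChar, hall]
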